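-- pv_equiv track=rewrite | github.com/dumdum11-00/dm2022 | 03.review.length.clustering.py | cal_dis
-- ===== SOURCE A (Python) =====
-- import pprint
--
-- def cal_dis(input):
--     disttance_mat= []
--     for x in input.keys():
--         res = {x:{i:abs(input[i]- input[x])for i, val in input.items() if i != x}}
--         disttance_mat.append(res)
--
--
--     pp = pprint.PrettyPrinter(width=41, compact=True)
--     pp.pprint(disttance_mat)
--     return disttance_mat
-- ===== SOURCE B (Python) =====
-- def cal_dis(input):
--     # Symmetric traversal: each unordered pair's distance is computed once
--     # and written into both rows (A recomputes it for every ordered pair).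
--     keys = list(input)
--     mat = {k: {} for k in keys}
--     rest = keys
--     while rest:
--         a, tail = rest[0], rest[1:]
--         for b in tail:
--             dist = abs(input[a] - input[b])
--             mat[a][b] = dist
--             mat[b][a] = dist
--         rest = tail
--     disttance_mat = [{k: mat[k]} for k in keys]
--     return disttance_mat
-- ===== Notes on version B (the rewrite author's own statement) =====
-- stated objective: alternative
-- what changed: B exploits the symmetry |x-y| = |y-x|: it walks the strictly-upper-triangular pairs once (head-plus-tail over the key list), computes each distance once and writes it into both rows of a prebuilt matrix dict, instead of A's full double comprehension that recomputes every ordered pair; row insertion order (key order minus self) is preserved.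
import Mathlib
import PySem

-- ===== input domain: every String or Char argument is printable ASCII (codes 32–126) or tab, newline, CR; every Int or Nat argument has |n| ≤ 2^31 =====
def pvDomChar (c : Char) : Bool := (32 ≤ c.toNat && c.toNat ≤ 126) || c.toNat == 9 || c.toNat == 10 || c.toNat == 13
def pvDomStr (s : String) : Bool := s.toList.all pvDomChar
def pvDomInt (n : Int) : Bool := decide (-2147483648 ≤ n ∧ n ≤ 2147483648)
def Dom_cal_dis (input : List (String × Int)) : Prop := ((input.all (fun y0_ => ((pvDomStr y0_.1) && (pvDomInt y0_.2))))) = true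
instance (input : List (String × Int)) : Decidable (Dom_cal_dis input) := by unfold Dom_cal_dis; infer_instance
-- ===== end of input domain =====

-- B computes each pairwise distance once (triangular traversal, symmetric write into both
-- rows) instead of A's full double pass; same return value. Side effects: A pprints the result, B does not (equivalence here is about the RETURN value only).
-- The dict parameter arrives as an association list and is normalised with Dict.ofList
-- (Python dict construction); lookups input[k] always hit (k is a key), ported as getD _ k 0.

-- ===== PORT A =====
def cal_dis (input : List (String × Int)) : List (List (String × List (String × Int))) :=
  let d := PySem.Dict.ofList input
  d.keys.foldl (fun mat x =>
    mat ++ [[(x,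
      (d.items.foldl (fun res p =>
          if p.1 ≠ x then res.insert p.1 |PySem.Dict.getD d p.1 0 - PySem.Dict.getD d x 0| else res)
        (PySem.Dict.empty : PySem.Dict String Int)).items)]]) []

-- ===== PORT B =====
-- inner 'for b in tail' body of Source B's while loop
def pairStep (d : PySem.Dict String Int) (a : String)
    (m : PySem.Dict String (PySem.Dict String Int)) (b : String) :
    PySem.Dict String (PySem.Dict String Int) :=
  let dist := |PySem.Dict.getD d a 0 - PySem.Dict.getD d b 0|
  (m.modify a PySem.Dict.empty (fun r => r.insert b dist)).modify b PySem.Dict.empty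
    (fun r => r.insert a dist)

-- Source B's while loop over suffixes of the key list
def fillPairs (d : PySem.Dict String Int) :
    List String → PySem.Dict String (PySem.Dict String Int) → PySem.Dict String (PySem.Dict String Int)
  | [], mat => mat
  | a :: tail, mat => fillPairs d tail (tail.foldl (pairStep d a) mat)

def cal_dis_alt (input : List (String × Int)) : List (List (String × List (String × Int))) :=
  let d := PySem.Dict.ofList input
  let keys := d.keys
  let mat0 := keys.foldl (fun m k => m.insert k (PySem.Dict.empty : PySem.Dict String Int))
    (PySem.Dict.empty : PySem.Dict String (PySem.Dict String Int))
  let mat := fillPairs d keys mat0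
  keys.map (fun k => [(k, (PySem.Dict.getD mat k PySem.Dict.empty).items)])

-- ===== PRECONDITION & SPEC =====
def Spec_cal_dis (input : List (String × Int)) (out : List (List (String × List (String × Int)))) : Prop := out = cal_dis_alt input
instance (input : List (String × Int)) (out : List (List (String × List (String × Int)))) : Decidable (Spec_cal_dis input out) := by unfold Spec_cal_dis; infer_instance

-- ===== CLAIM (what is proved, stated in full; the proofs are below) =====
def Claim_equal_cal_dis : Prop := ∀ (input : List (String × Int)), Dom_cal_dis input → Spec_cal_dis input (cal_dis input)

-- ===== LEMMAS AND PROOFS =====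

-- the row A builds for key k: fold over l inserting every i ≠ k with |v i - v k|
def rowFold (d : PySem.Dict String Int) (k : String) (l : List String)
    (r : PySem.Dict String Int) : PySem.Dict String Int :=
  l.foldl (fun r i => if i ≠ k then r.insert i |PySem.Dict.getD d i 0 - PySem.Dict.getD d k 0| else r) r

-- the inner pair loop leaves rows of keys other than a and the tail untouched
theorem getD_foldl_pairStep_of_ne (d : PySem.Dict String Int) (a k : String)
    (tl : List String) (m : PySem.Dict String (PySem.Dict String Int))
    (hka : k ≠ a) (hk : k ∉ tl) :
    PySem.Dict.getD (tl.foldl (pairStep d a) m) k PySem.Dict.empty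
      = PySem.Dict.getD m k PySem.Dict.empty := by
  induction tl generalizing m with
  | nil => rfl
  | cons b tl ih =>
    have hkb : k ≠ b := fun h => hk (h ▸ List.mem_cons_self)
    have hk' : k ∉ tl := fun h => hk (List.mem_cons_of_mem _ h)
    simp only [List.foldl_cons]
    rw [ih _ hk']
    simp only [pairStep]
    rw [PySem.Dict.getD_modify_of_ne _ _ _ hkb, PySem.Dict.getD_modify_of_ne _ _ _ hka]

-- the inner pair loop's effect on the head row a
theorem getD_foldl_pairStep_self (d : PySem.Dict String Int) (a : String)
    (tl : List String) (m : PySem.Dict String (PySem.Dict String Int)) (ha : a ∉ tl) :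
    PySem.Dict.getD (tl.foldl (pairStep d a) m) a PySem.Dict.empty
      = tl.foldl (fun r b => r.insert b |PySem.Dict.getD d a 0 - PySem.Dict.getD d b 0|)
          (PySem.Dict.getD m a PySem.Dict.empty) := by
  induction tl generalizing m with
  | nil => rfl
  | cons b tl ih =>
    have hab : a ≠ b := fun h => ha (h ▸ List.mem_cons_self)
    have ha' : a ∉ tl := fun h => ha (List.mem_cons_of_mem _ h)
    simp only [List.foldl_cons]
    rw [ih _ ha']
    congr 1
    simp only [pairStep]
    rw [PySem.Dict.getD_modify_of_ne _ _ _ hab, PySem.Dict.getD_modify_self]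

-- the inner pair loop's effect on the row of a tail member k: one symmetric entry (a, dist)
theorem getD_foldl_pairStep_mem (d : PySem.Dict String Int) (a k : String)
    (tl : List String) (m : PySem.Dict String (PySem.Dict String Int))
    (hk : k ∈ tl) (hnd : tl.Nodup) (hka : k ≠ a) :
    PySem.Dict.getD (tl.foldl (pairStep d a) m) k PySem.Dict.empty
      = (PySem.Dict.getD m k PySem.Dict.empty).insert a |PySem.Dict.getD d a 0 - PySem.Dict.getD d k 0| := by
  induction tl generalizing m with
  | nil => cases hk
  | cons b tl ih =>
    have hb : b ∉ tl := (List.nodup_cons.mp hnd).1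
    have hnd' : tl.Nodup := (List.nodup_cons.mp hnd).2
    simp only [List.foldl_cons]
    by_cases hkb : k = b
    · subst hkb
      rw [getD_foldl_pairStep_of_ne d a k tl _ hka hb]
      simp only [pairStep]
      rw [PySem.Dict.getD_modify_self, PySem.Dict.getD_modify_of_ne _ _ _ hka]
    · have hk' : k ∈ tl := by
        rcases List.mem_cons.mp hk with h | h
        · exact absurd h hkb
        · exact h
      rw [ih _ hk' hnd']
      have huntouched : PySem.Dict.getD (pairStep d a m b) k PySem.Dict.empty
          = PySem.Dict.getD m k PySem.Dict.empty := by
        simp only [pairStep]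
        rw [PySem.Dict.getD_modify_of_ne _ _ _ hkb, PySem.Dict.getD_modify_of_ne _ _ _ hka]
      rw [huntouched]

-- fillPairs only touches rows of keys in rest
theorem getD_fillPairs_of_not_mem (d : PySem.Dict String Int) (rest : List String)
    (mat : PySem.Dict String (PySem.Dict String Int)) (k : String) (hk : k ∉ rest) :
    PySem.Dict.getD (fillPairs d rest mat) k PySem.Dict.empty
      = PySem.Dict.getD mat k PySem.Dict.empty := by
  induction rest generalizing mat with
  | nil => rfl
  | cons a tail ih =>
    have hka : k ≠ a := fun h => hk (h ▸ List.mem_cons_self)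
    have hk' : k ∉ tail := fun h => hk (List.mem_cons_of_mem _ h)
    simp only [fillPairs]
    rw [ih _ hk', getD_foldl_pairStep_of_ne d a k tail mat hka hk']

-- main invariant: after fillPairs, the row of k ∈ rest is its initial row extended by
-- the entries (i, |v i - v k|) for every i ∈ rest, i ≠ k, in rest's order
theorem getD_fillPairs_mem (d : PySem.Dict String Int) (rest : List String)
    (hnd : rest.Nodup) (mat : PySem.Dict String (PySem.Dict String Int)) (k : String)
    (hk : k ∈ rest) :
    PySem.Dict.getD (fillPairs d rest mat) k PySem.Dict.empty
      = rowFold d k rest (PySem.Dict.getD mat k PySem.Dict.empty) := by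
  induction rest generalizing mat with
  | nil => cases hk
  | cons a tail ih =>
    have ha : a ∉ tail := (List.nodup_cons.mp hnd).1
    have hnd' : tail.Nodup := (List.nodup_cons.mp hnd).2
    simp only [fillPairs]
    by_cases hka : k = a
    · subst hka
      rw [getD_fillPairs_of_not_mem d tail _ k ha,
        getD_foldl_pairStep_self d k tail mat ha]
      simp only [rowFold, List.foldl_cons, ne_eq, not_true_eq_false, if_false]
      exact PySem.List.foldl_congr_mem _ _ _ _ (fun r b hb => by
        have hbk : b ≠ k := fun h => ha (h ▸ hb)
        simp only [hbk, not_false_eq_true, if_true, abs_sub_comm])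
    · have hk' : k ∈ tail := by
        rcases List.mem_cons.mp hk with h | h
        · exact absurd h hka
        · exact h
      rw [ih hnd' _ hk',
        getD_foldl_pairStep_mem d a k tail mat hk' hnd' hka]
      simp only [rowFold, List.foldl_cons, ne_eq]
      have hak : ¬ (a = k) := fun h => hka h.symm
      rw [if_pos hak, abs_sub_comm]

-- the initial matrix has the empty row at every key
theorem getD_init_empty (l : List String) (m : PySem.Dict String (PySem.Dict String Int))
    (k : String) (h : PySem.Dict.getD m k PySem.Dict.empty = PySem.Dict.empty) :
    PySem.Dict.getD
      (l.foldl (fun m k' => m.insert k' (PySem.Dict.empty : PySem.Dict String Int)) m) k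
      PySem.Dict.empty = PySem.Dict.empty := by
  induction l generalizing m with
  | nil => exact h
  | cons b l ih =>
    simp only [List.foldl_cons]
    apply ih
    by_cases hkb : k = b
    · subst hkb; rw [PySem.Dict.getD_insert_self]
    · rw [PySem.Dict.getD_insert_of_ne _ _ _ hkb]; exact h

-- ===== VERDICT (by name: the statement is the Claim_ definition above) =====
theorem cal_dis_spec : Claim_equal_cal_dis := by
  unfold Claim_equal_cal_dis
  intro input _
  unfold Spec_cal_dis cal_dis cal_dis_alt
  simp only []
  set d := PySem.Dict.ofList input with hd
  have hnd : d.keys.Nodup := PySem.Dict.nodup_keys_ofList input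
  rw [PySem.List.foldl_append_singleton_eq_map, List.nil_append]
  apply List.map_congr_left
  intro k hk
  have hrow : PySem.Dict.getD
      (fillPairs d d.keys
        (d.keys.foldl (fun m k' => m.insert k' (PySem.Dict.empty : PySem.Dict String Int))
          PySem.Dict.empty)) k PySem.Dict.empty
      = rowFold d k d.keys PySem.Dict.empty := by
    rw [getD_fillPairs_mem d d.keys hnd _ k hk,
      getD_init_empty d.keys PySem.Dict.empty k rfl]
  rw [hrow]
  -- A's fold over d.items only reads the key p.1, so it is rowFold over d.keys
  have hfold : d.items.foldl (fun res p =>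
        if p.1 ≠ k then res.insert p.1 |PySem.Dict.getD d p.1 0 - PySem.Dict.getD d k 0| else res)
      (PySem.Dict.empty : PySem.Dict String Int) = rowFold d k d.keys PySem.Dict.empty := by
    unfold rowFold
    simp only [PySem.Dict.keys, List.foldl_map]
  rw [hfold]
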